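-- pv_equiv track=rewrite | github.com/NVISOsecurity/ee-outliers | app/analyzers/ml_models/word2vec.py | get_sentence_skipgrams_restore
-- ===== SOURCE A (Python) =====
-- from typing import List, Tuple, Dict, Any, Union, Optional
--
-- def get_sentence_skipgrams_restore(sentence: List, skip_window: int) -> Tuple[List, List]:
--     sentence_targets: List = []
--     sentence_labels: List = []
--     for i in range(len(sentence)):  # i = target word
--         context_indices: List = [j for j in range(max(0, (i - skip_window)), min(len(sentence), i + 1 + skip_window))
--                            if j != i]
--         sentence_targets.append(sentence[i])
--         labels: List = []
--         for context_index in context_indices: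
--             labels.append(sentence[context_index])
--         sentence_labels.append(labels)
--     return sentence_targets, sentence_labels
-- ===== SOURCE B (Python) =====
-- def get_sentence_skipgrams_restore(sentence, skip_window):
--     w = max(skip_window, 0)
--     sentence_targets = list(sentence)
--     sentence_labels = [sentence[max(0, i - w):i] + sentence[i + 1:i + 1 + w]
--                        for i in range(len(sentence))]
--     return sentence_targets, sentence_labels
-- ===== Notes on version B (the rewrite author's own statement) =====
-- stated objective: simpler
-- what changed: Replaces the index-range comprehension with j != i filtering plus the inner append loop by two list slices (left and right context halves) concatenated, with the window width clamped to be non-negative; targets become a plain copy of the sentence.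
import Mathlib
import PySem

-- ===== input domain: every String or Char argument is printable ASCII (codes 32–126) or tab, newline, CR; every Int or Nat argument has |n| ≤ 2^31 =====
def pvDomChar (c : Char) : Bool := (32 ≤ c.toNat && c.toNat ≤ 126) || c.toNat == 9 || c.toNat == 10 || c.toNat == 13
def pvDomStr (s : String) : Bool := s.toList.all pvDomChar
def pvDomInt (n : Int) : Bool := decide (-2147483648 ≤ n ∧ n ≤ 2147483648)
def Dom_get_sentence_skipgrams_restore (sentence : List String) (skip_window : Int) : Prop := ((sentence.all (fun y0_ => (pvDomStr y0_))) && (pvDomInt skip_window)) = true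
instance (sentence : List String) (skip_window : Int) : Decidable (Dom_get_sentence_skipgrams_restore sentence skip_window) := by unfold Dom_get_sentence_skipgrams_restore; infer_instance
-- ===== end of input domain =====

-- B replaces the filtered index range + inner append loop by two concatenated slices per target (objective: simpler).

-- ===== PORT A =====
def get_sentence_skipgrams_restore (sentence : List String) (skip_window : Int) : List String × List (List String) :=
  (PySem.List.pyRange 0 (PySem.List.len sentence) 1).foldl
    (fun acc i =>
      let context_indices : List Int :=
        (PySem.List.pyRange (max 0 (i - skip_window)) (min (PySem.List.len sentence) (i + 1 + skip_window)) 1).filter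
          (fun j => j != i)
      (acc.1 ++ [PySem.List.pyGetD sentence i ""],
       acc.2 ++ [context_indices.foldl (fun labels j => labels ++ [PySem.List.pyGetD sentence j ""]) []]))
    ([], [])

-- ===== PORT B =====
def get_sentence_skipgrams_restore_alt (sentence : List String) (skip_window : Int) : List String × List (List String) :=
  let w := max skip_window 0
  (sentence,
   (PySem.List.pyRange 0 (PySem.List.len sentence) 1).map
     (fun i => PySem.List.slice sentence (some (max 0 (i - w))) (some i)
            ++ PySem.List.slice sentence (some (i + 1)) (some (i + 1 + w))))

-- ===== PRECONDITION & SPEC =====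
def Spec_get_sentence_skipgrams_restore (sentence : List String) (skip_window : Int) (out : List String × List (List String)) : Prop := out = get_sentence_skipgrams_restore_alt sentence skip_window
instance (sentence : List String) (skip_window : Int) (out : List String × List (List String)) : Decidable (Spec_get_sentence_skipgrams_restore sentence skip_window out) := by unfold Spec_get_sentence_skipgrams_restore; infer_instance

-- ===== CLAIM (what is proved, stated in full; the proofs are below) =====
def Claim_equal_get_sentence_skipgrams_restore : Prop := ∀ (sentence : List String) (skip_window : Int), Dom_get_sentence_skipgrams_restore sentence skip_window → Spec_get_sentence_skipgrams_restore sentence skip_window (get_sentence_skipgrams_restore sentence skip_window)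

-- ===== LEMMAS AND PROOFS =====

-- map of pyGetD over a Nat-bounded range is drop/take
lemma map_pyGetD_range_drop_take (xs : List String) :
    ∀ (k a : Nat), a + k ≤ xs.length →
      (PySem.List.pyRange (a : Int) ((a : Int) + (k : Int)) 1).map
        (fun j => PySem.List.pyGetD xs j "") = (xs.drop a).take k := by
  intro k
  induction k with
  | zero =>
    intro a h
    simp [PySem.List.pyRange_one_eq_nil]
  | succ k ih =>
    intro a h
    rw [PySem.List.pyRange_one_cons (by push_cast; omega)]
    have ha : a < xs.length := by omega
    have step : (a : Int) + 1 = ((a + 1 : Nat) : Int) := by push_cast; ring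
    have hb : (a : Int) + ((k : Nat) + 1 : Nat) = ((a + 1 : Nat) : Int) + (k : Int) := by
      push_cast; ring
    rw [List.map_cons, hb, step, ih (a + 1) (by omega),
      List.drop_eq_getElem_cons ha, List.take_succ_cons]
    simp [PySem.List.pyGetD_natCast, List.getD_eq_getElem?_getD, List.getElem?_eq_getElem ha]

theorem get_sentence_skipgrams_restore_eq (sentence : List String) (skip_window : Int) :
    get_sentence_skipgrams_restore sentence skip_window
      = get_sentence_skipgrams_restore_alt sentence skip_window := by
  unfold get_sentence_skipgrams_restore get_sentence_skipgrams_restore_alt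
  rw [PySem.List.foldl_prod_mk
        (f := fun (t : List String) (i : Int) => t ++ [PySem.List.pyGetD sentence i ""])
        (g := fun (l : List (List String)) (i : Int) =>
          l ++ [((PySem.List.pyRange (max 0 (i - skip_window))
                    (min (PySem.List.len sentence) (i + 1 + skip_window)) 1).filter
                  (fun j => j != i)).foldl
                  (fun labels j => labels ++ [PySem.List.pyGetD sentence j ""]) []])]
  refine Prod.ext ?_ ?_
  · simp only
    rw [PySem.List.foldl_append_singleton_eq_map, PySem.List.map_pyGetD_pyRange_zero]
    simp
  · simp only
    rw [PySem.List.foldl_append_singleton_eq_map, List.nil_append]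
    refine List.map_congr_left ?_
    intro i hi
    rw [PySem.List.foldl_append_singleton_eq_map, List.nil_append]
    have hmem := (PySem.List.mem_pyRange_one).mp hi
    simp only [PySem.List.len_eq] at hmem
    obtain ⟨hi0, hin⟩ := hmem
    set n : Nat := sentence.length with hn
    -- i as a Nat
    obtain ⟨iN, rfl⟩ : ∃ iN : Nat, (iN : Int) = i := ⟨i.toNat, Int.toNat_of_nonneg hi0⟩
    have hiN : iN < n := by exact_mod_cast hin
    by_cases hsw : 0 ≤ skip_window
    · -- positive or zero window: both are left ++ right contexts
      obtain ⟨wN, rfl⟩ : ∃ wN : Nat, (wN : Int) = skip_window := ⟨skip_window.toNat, Int.toNat_of_nonneg hsw⟩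
      have hmax : max (wN : Int) 0 = (wN : Int) := by omega
      have ha : max 0 ((iN : Int) - wN) = ((iN - wN : Nat) : Int) := by omega
      have hm : min ((n : Nat) : Int) ((iN : Int) + 1 + wN) = ((min n (iN + 1 + wN) : Nat) : Int) := by
        push_cast; omega
      have hsplit : PySem.List.pyRange ((iN - wN : Nat) : Int) ((min n (iN + 1 + wN) : Nat) : Int) 1
          = PySem.List.pyRange ((iN - wN : Nat) : Int) (iN : Int) 1
            ++ ((iN : Int) :: PySem.List.pyRange ((iN : Int) + 1) ((min n (iN + 1 + wN) : Nat) : Int) 1) := by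
        rw [← PySem.List.pyRange_one_cons (by push_cast; omega)]
        exact PySem.List.pyRange_one_append _ _ _ (by omega) (by push_cast; omega)
      simp only [PySem.List.len_eq, ← hn, hmax, ha, hm, hsplit]
      rw [List.filter_append]
      have hfl : (PySem.List.pyRange ((iN - wN : Nat) : Int) (iN : Int) 1).filter (fun j : Int => j != (iN : Int))
          = PySem.List.pyRange ((iN - wN : Nat) : Int) (iN : Int) 1 := by
        refine List.filter_eq_self.mpr ?_
        intro j hj
        have := (PySem.List.mem_pyRange_one).mp hj
        simp only [bne_iff_ne, ne_eq]
        omega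
      have hfr : ((iN : Int) :: PySem.List.pyRange ((iN : Int) + 1) ((min n (iN + 1 + wN) : Nat) : Int) 1).filter (fun j : Int => j != (iN : Int))
          = PySem.List.pyRange ((iN : Int) + 1) ((min n (iN + 1 + wN) : Nat) : Int) 1 := by
        rw [List.filter_cons]
        simp only [bne_self_eq_false]
        refine List.filter_eq_self.mpr ?_
        intro j hj
        have := (PySem.List.mem_pyRange_one).mp hj
        simp only [bne_iff_ne, ne_eq]
        omega
      rw [hfl, hfr, List.map_append]
      -- left part
      have hleft : (PySem.List.pyRange ((iN - wN : Nat) : Int) (iN : Int) 1).map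
          (fun j => PySem.List.pyGetD sentence j "")
          = PySem.List.slice sentence (some ((iN - wN : Nat) : Int)) (some (iN : Int)) := by
        have hcast : (iN : Int) = ((iN - wN : Nat) : Int) + ((iN - (iN - wN) : Nat) : Int) := by
          omega
        rw [hcast, map_pyGetD_range_drop_take sentence (iN - (iN - wN)) (iN - wN) (by omega),
          PySem.List.slice_natCast_add]
      -- right part
      have hright : (PySem.List.pyRange ((iN : Int) + 1) ((min n (iN + 1 + wN) : Nat) : Int) 1).map
          (fun j => PySem.List.pyGetD sentence j "")
          = PySem.List.slice sentence (some ((iN : Int) + 1)) (some ((iN : Int) + 1 + wN)) := by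
        have hc1 : (iN : Int) + 1 = ((iN + 1 : Nat) : Int) := by push_cast; ring
        have hc2 : ((min n (iN + 1 + wN) : Nat) : Int)
            = ((iN + 1 : Nat) : Int) + ((min n (iN + 1 + wN) - (iN + 1) : Nat) : Int) := by
          push_cast; omega
        rw [hc1, hc2, map_pyGetD_range_drop_take sentence _ (iN + 1) (by omega),
          PySem.List.slice_natCast_add]
        -- (drop (iN+1)).take (min n (iN+1+wN) - (iN+1)) = (drop (iN+1)).take wN
        have hlen : (sentence.drop (iN + 1)).length = n - (iN + 1) := by
          simp [hn]
        by_cases hcase : iN + 1 + wN ≤ n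
        · have : min n (iN + 1 + wN) - (iN + 1) = wN := by omega
          rw [this]
        · have h1 : min n (iN + 1 + wN) - (iN + 1) = n - (iN + 1) := by omega
          rw [h1, List.take_of_length_le (by omega), List.take_of_length_le (by omega)]
      rw [hleft, hright]
    · -- negative window: A's index range is empty, B's slices are empty
      have hwm : max skip_window 0 = (0 : Int) := by omega
      have hempty : PySem.List.pyRange (max 0 ((iN : Int) - skip_window))
          (min ((n : Nat) : Int) ((iN : Int) + 1 + skip_window)) 1 = [] := by
        apply PySem.List.pyRange_one_eq_nil
        omega
      simp only [PySem.List.len_eq, ← hn, hempty, List.filter_nil, List.map_nil, hwm,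
        add_zero, sub_zero]
      have h0 : max 0 (iN : Int) = ((iN : Nat) : Int) := by omega
      rw [h0, PySem.List.slice_natCast]
      have hc : (iN : Int) + 1 = ((iN + 1 : Nat) : Int) := by push_cast; ring
      rw [hc, PySem.List.slice_natCast]
      simp

-- ===== VERDICT (by name: the statement is the Claim_ definition above) =====
theorem get_sentence_skipgrams_restore_spec : Claim_equal_get_sentence_skipgrams_restore := by
  intro sentence skip_window _
  unfold Spec_get_sentence_skipgrams_restore
  exact get_sentence_skipgrams_restore_eq sentence skip_window
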